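-- pv_equiv track=rewrite | github.com/smoussavi00/cm | lexer.py | fsep
-- ===== SOURCE A (Python) =====
-- def fsep(t):
--     t2 = []
--     for token in t:
--         st = ""
--         for char in token:
--             if char in "{}[]();:,":
--                 if st != "":
--                     t2.append(st)
--                     st = ""
--                 t2.append(char)
--             else:
--                 st = st + char
--         if st != "":
--             t2.append(st)
--     return t2
-- ===== SOURCE B (Python) =====
-- SEP = "{}[]();:,"
--
-- def fsep(t):
--     # span-based scan: slice maximal non-separator runs instead of
--     # accumulating characters one by one
--     out = []
--     for token in t:
--         i, n = 0, len(token)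
--         while i < n:
--             if token[i] in SEP:
--                 out.append(token[i])
--                 i += 1
--             else:
--                 j = i
--                 while j < n and token[j] not in SEP:
--                     j += 1
--                 out.append(token[i:j])
--                 i = j
--     return out
-- ===== Notes on version B (the rewrite author's own statement) =====
-- stated objective: idiomatic
-- what changed: B splits each token into maximal runs by index spans (slice out whole non-separator runs), instead of A's character-by-character string accumulator with flush logic.
import Mathlib
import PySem

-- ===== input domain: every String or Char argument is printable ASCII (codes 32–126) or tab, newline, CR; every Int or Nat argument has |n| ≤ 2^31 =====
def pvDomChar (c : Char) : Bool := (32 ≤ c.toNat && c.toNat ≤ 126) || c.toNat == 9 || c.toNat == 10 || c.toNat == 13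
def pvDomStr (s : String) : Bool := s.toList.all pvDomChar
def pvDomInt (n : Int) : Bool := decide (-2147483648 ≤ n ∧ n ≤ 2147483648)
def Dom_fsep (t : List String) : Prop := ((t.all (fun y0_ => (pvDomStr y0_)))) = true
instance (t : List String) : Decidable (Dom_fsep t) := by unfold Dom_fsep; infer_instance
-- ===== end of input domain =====

-- B re-implements the split by slicing maximal non-separator runs (span scan)
-- instead of A's character-by-character string accumulator; objective: idiomatic.

def sepChars : List Char := "{}[]();:,".toList

-- ===== PORT A =====
-- body of A's inner character loop: state (t2, st)
def fsepStep (acc : List String × String) (c : Char) : List String × String :=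
  if c ∈ sepChars then
    ((if acc.2 ≠ "" then acc.1 ++ [acc.2] else acc.1) ++ [String.ofList [c]], "")
  else
    (acc.1, acc.2.push c)

def fsep (t : List String) : List String :=
  t.foldl (fun t2 token =>
    let p := token.toList.foldl fsepStep (t2, "")
    if p.2 ≠ "" then p.1 ++ [p.2] else p.1) []

-- ===== PORT B =====
-- B's inner while-loop: emit one separator char, or slice out a whole run
def splitTok : List Char → List String
  | [] => []
  | c :: cs =>
    if c ∈ sepChars then String.ofList [c] :: splitTok cs
    else String.ofList (c :: cs.takeWhile (fun d => d ∉ sepChars)) ::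
         splitTok (cs.dropWhile (fun d => d ∉ sepChars))
termination_by l => l.length
decreasing_by
  · simp
  · exact Nat.lt_of_le_of_lt (List.length_dropWhile_le _ _) (by simp)

def fsep_alt (t : List String) : List String :=
  t.foldl (fun out token => out ++ splitTok token.toList) []

-- ===== PRECONDITION & SPEC =====
def Spec_fsep (t : List String) (out : List String) : Prop := out = fsep_alt t
instance (t : List String) (out : List String) : Decidable (Spec_fsep t out) := by unfold Spec_fsep; infer_instance

-- ===== CLAIM (what is proved, stated in full; the proofs are below) =====
def Claim_equal_fsep : Prop := ∀ (t : List String), Dom_fsep t → Spec_fsep t (fsep t)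

-- ===== LEMMAS AND PROOFS =====

theorem ofList_push (st : List Char) (c : Char) :
    (String.ofList st).push c = String.ofList (st ++ [c]) := by
  rw [← String.toList_inj]
  simp

theorem splitTok_nonsep_prefix (xs : List Char) (cs : List Char)
    (h : ∀ c ∈ xs, c ∉ sepChars) (hne : xs ≠ []) :
    splitTok (xs ++ cs) =
      String.ofList (xs ++ cs.takeWhile (fun d => d ∉ sepChars)) ::
        splitTok (cs.dropWhile (fun d => d ∉ sepChars)) := by
  cases xs with
  | nil => exact absurd rfl hne
  | cons x xs =>
    have hx : x ∉ sepChars := h x (List.mem_cons_self ..)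
    have hall : ∀ c ∈ xs, (fun d => decide (d ∉ sepChars)) c = true := by
      intro c hc
      simpa using h c (List.mem_cons_of_mem _ hc)
    have htw : xs.takeWhile (fun d => decide (d ∉ sepChars)) = xs :=
      List.takeWhile_eq_self_iff.mpr hall
    have hdw : xs.dropWhile (fun d => decide (d ∉ sepChars)) = [] :=
      List.dropWhile_eq_nil_iff.mpr hall
    rw [List.cons_append, splitTok, if_neg hx, List.takeWhile_append, List.dropWhile_append,
        htw, hdw]
    simp

theorem fsep_inner (cs : List Char) : ∀ (t2 : List String) (st : List Char),
    (∀ c ∈ st, c ∉ sepChars) →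
    (let p := cs.foldl fsepStep (t2, String.ofList st)
     if p.2 ≠ "" then p.1 ++ [p.2] else p.1) = t2 ++ splitTok (st ++ cs) := by
  induction cs with
  | nil =>
    intro t2 st hst
    by_cases hne : st = []
    · subst hne; simp [splitTok]
    · rw [splitTok_nonsep_prefix st [] hst hne]
      simp [splitTok, String.ofList_eq_empty_iff, hne]
  | cons c cs ih =>
    intro t2 st hst
    simp only [List.foldl_cons]
    by_cases hc : c ∈ sepChars
    · rw [show fsepStep (t2, String.ofList st) c =
        ((if String.ofList st ≠ "" then t2 ++ [String.ofList st] else t2) ++ [String.ofList [c]], "")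
        from by simp [fsepStep, hc]]
      rw [show ("" : String) = String.ofList [] from rfl]
      rw [ih _ [] (by simp)]
      by_cases hne : st = []
      · subst hne
        simp [splitTok, hc]
      · rw [splitTok_nonsep_prefix st (c :: cs) hst hne, List.takeWhile_cons, List.dropWhile_cons]
        simp [splitTok, hc, hne, String.ofList_eq_empty_iff]
    · rw [show fsepStep (t2, String.ofList st) c = (t2, (String.ofList st).push c)
        from by simp [fsepStep, hc]]
      rw [ofList_push, ih t2 (st ++ [c])
        (by intro d hd; rcases List.mem_append.mp hd with h' | h'
            · exact hst d h'
            · simpa using (List.mem_singleton.mp h') ▸ hc)]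
      simp

-- ===== VERDICT (by name: the statement is the Claim_ definition above) =====
theorem fsep_spec : Claim_equal_fsep := by
  intro t _
  unfold Spec_fsep fsep fsep_alt
  congr 1
  funext t2 token
  have := fsep_inner token.toList t2 [] (by simp)
  simpa using this
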